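-- pv_equiv track=rewrite | github.com/povijarrro/workspacepython | adventofcode/adventofcode2019/day01_19.py | fuel
-- ===== SOURCE A (Python) =====
-- def fuel(n:int,part = 1)->int:
--     if part == 1:
--         return max(0,n//3 - 2)
--     else:
--         m = n//3 -2
--         if m<=0:
--             return 0
--         else:
--             return m +fuel(m,part)
-- ===== SOURCE B (Python) =====
-- def fuel(n: int, part=1) -> int:
--     if part == 1:
--         return max(0, n // 3 - 2)
--     total = 0
--     m = n // 3 - 2
--     while m > 0:
--         total += m
--         m = m // 3 - 2
--     return total
-- ===== Notes on version B (the rewrite author's own statement) =====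
-- stated objective: alternative
-- what changed: Part 2's linear recursion is replaced by an iterative accumulator loop (while m > 0: total += m; m = m//3 - 2); Part 1 keeps the closed form.
import Mathlib
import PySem

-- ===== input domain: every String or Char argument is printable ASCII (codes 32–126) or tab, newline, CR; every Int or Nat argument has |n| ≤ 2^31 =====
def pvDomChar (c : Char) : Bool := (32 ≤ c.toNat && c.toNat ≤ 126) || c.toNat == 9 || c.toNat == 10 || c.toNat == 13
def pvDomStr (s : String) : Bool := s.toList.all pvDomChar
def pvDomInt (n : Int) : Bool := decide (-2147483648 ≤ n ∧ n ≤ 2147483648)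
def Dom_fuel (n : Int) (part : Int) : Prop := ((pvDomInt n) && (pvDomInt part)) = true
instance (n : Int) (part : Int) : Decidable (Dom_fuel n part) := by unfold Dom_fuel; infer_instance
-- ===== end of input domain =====

-- B replaces Part 2's linear recursion by an iterative accumulator loop; same values, O(1) stack (objective: alternative).

-- floor division by 3 loses at least two thirds (used by both ports for termination)
theorem pv_fd3_bound (m : Int) : 3 * (PySem.Int.floordiv m 3 - 2) + 6 ≤ m := by
  have h := (PySem.Int.le_floordiv_iff_mul_le (a := m) (b := 3) (q := PySem.Int.floordiv m 3)
    (by norm_num)).mp le_rfl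
  omega

-- ===== PORT A =====
def fuel (n : Int) (part : Int) : Int :=
  if part = 1 then max 0 (PySem.Int.floordiv n 3 - 2)
  else
    let m := PySem.Int.floordiv n 3 - 2
    if m ≤ 0 then 0 else m + fuel m part
termination_by n.toNat
decreasing_by
  have := pv_fd3_bound n
  omega

-- ===== PORT B =====
def fuelLoop (m : Int) (total : Int) : Int :=
  if m > 0 then fuelLoop (PySem.Int.floordiv m 3 - 2) (total + m) else total
termination_by m.toNat
decreasing_by
  have := pv_fd3_bound m
  omega

def fuel_alt (n : Int) (part : Int) : Int :=
  if part = 1 then max 0 (PySem.Int.floordiv n 3 - 2)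
  else fuelLoop (PySem.Int.floordiv n 3 - 2) 0

-- ===== PRECONDITION & SPEC =====
def Spec_fuel (n : Int) (part : Int) (out : Int) : Prop := out = fuel_alt n part
instance (n : Int) (part : Int) (out : Int) : Decidable (Spec_fuel n part out) := by unfold Spec_fuel; infer_instance

-- ===== CLAIM (what is proved, stated in full; the proofs are below) =====
def Claim_equal_fuel : Prop := ∀ (n : Int) (part : Int), Dom_fuel n part → Spec_fuel n part (fuel n part)

-- ===== LEMMAS AND PROOFS =====

theorem pv_fuelLoop_eq (m a : Int) :
    fuelLoop m a = if m > 0 then fuelLoop (PySem.Int.floordiv m 3 - 2) (a + m) else a := by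
  rw [fuelLoop]

theorem pv_fuel_eq (n part : Int) :
    fuel n part = if part = 1 then max 0 (PySem.Int.floordiv n 3 - 2)
      else if PySem.Int.floordiv n 3 - 2 ≤ 0 then 0
      else (PySem.Int.floordiv n 3 - 2) + fuel (PySem.Int.floordiv n 3 - 2) part := by
  rw [fuel]

theorem pv_loop_shift : ∀ (k : Nat) (m a : Int), m.toNat ≤ k → fuelLoop m a = a + fuelLoop m 0 := by
  intro k
  induction k with
  | zero =>
    intro m a hm
    rw [pv_fuelLoop_eq m a, pv_fuelLoop_eq m 0]
    have h : ¬ m > 0 := by omega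
    simp [h]
  | succ k ih =>
    intro m a hm
    rw [pv_fuelLoop_eq m a, pv_fuelLoop_eq m 0]
    by_cases h : m > 0
    · simp only [if_pos h]
      have hlt := pv_fd3_bound m
      rw [ih _ (a + m) (by omega), ih _ (0 + m) (by omega)]
      ring
    · simp [h]

theorem pv_fuel_eq_loop : ∀ (k : Nat) (n part : Int), part ≠ 1 → n.toNat ≤ k →
    fuel n part = fuelLoop (PySem.Int.floordiv n 3 - 2) 0 := by
  intro k
  induction k with
  | zero =>
    intro n part hp hn
    rw [pv_fuel_eq, pv_fuelLoop_eq]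
    have hb := pv_fd3_bound n
    have h1 : PySem.Int.floordiv n 3 - 2 ≤ 0 := by omega
    have h2 : ¬ PySem.Int.floordiv n 3 - 2 > 0 := by omega
    rw [if_neg hp, if_pos h1, if_neg h2]
  | succ k ih =>
    intro n part hp hn
    rw [pv_fuel_eq, pv_fuelLoop_eq]
    set m := PySem.Int.floordiv n 3 - 2 with hm
    by_cases h : m > 0
    · have hb : 3 * m + 6 ≤ n := by rw [hm]; exact pv_fd3_bound n
      have hb2 := pv_fd3_bound m
      have h1 : ¬ m ≤ 0 := by omega
      simp only [hp, if_pos h, h1, ite_false]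
      rw [ih m part hp (by omega), pv_loop_shift k _ (0 + m) (by omega)]
      ring
    · have h1 : m ≤ 0 := by omega
      simp [hp, h1, h]

-- ===== VERDICT (by name: the statement is the Claim_ definition above) =====
theorem fuel_spec : Claim_equal_fuel := by
  intro n part _
  unfold Spec_fuel fuel_alt
  by_cases hp : part = 1
  · rw [pv_fuel_eq]; simp [hp]
  · rw [pv_fuel_eq_loop n.toNat n part hp le_rfl]
    simp [hp]
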